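-- pv_equiv track=rewrite | github.com/mbohra07/financial-ml-mcp-server | analysis/portfolio_analyzer.py | _summarize_fundamental_portfolio
-- ===== SOURCE A (Python) =====
-- from typing import Dict, List, Any
--
-- def _summarize_fundamental_portfolio(analysis_results: Dict[str, Any]) -> Dict[str, Any]:
--     """Summarize fundamental analysis for entire portfolio"""
--     try:
--         categories = {}
--         recommendations = {}
--
--         for symbol, data in analysis_results.items():
--             category = data.get("category", "Unknown")
--             recommendation = data.get("recommendation", "Hold")
--
--             categories[category] = categories.get(category, 0) + 1
--             recommendations[recommendation] = recommendations.get(recommendation, 0) + 1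
--
--         return {
--             "category_distribution": categories,
--             "recommendation_distribution": recommendations
--         }
--     except:
--         return {}
-- ===== SOURCE B (Python) =====
-- def _tally(values):
--     # distribution of a list of values: first-occurrence-ordered distinct keys,
--     # each counted with list.count
--     seen = []
--     for v in values:
--         if v not in seen:
--             seen.append(v)
--     return {v: values.count(v) for v in seen}
--
--
-- def _summarize_fundamental_portfolio(analysis_results):
--     """Summarize fundamental analysis for entire portfolio"""
--     try:
--         categories = [data.get("category", "Unknown") for data in analysis_results.values()]
--         recommendations = [data.get("recommendation", "Hold") for data in analysis_results.values()]
--         return {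
--             "category_distribution": _tally(categories),
--             "recommendation_distribution": _tally(recommendations),
--         }
--     except:
--         return {}
-- ===== Notes on version B (the rewrite author's own statement) =====
-- stated objective: alternative
-- what changed: A's single pass that increments two count dicts is replaced by projecting each field into a value list, deduplicating it into its first-occurrence key set, and computing each key's frequency with a separate list.count scan (dedup-then-count instead of incremental dict counting).
import Mathlib
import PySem

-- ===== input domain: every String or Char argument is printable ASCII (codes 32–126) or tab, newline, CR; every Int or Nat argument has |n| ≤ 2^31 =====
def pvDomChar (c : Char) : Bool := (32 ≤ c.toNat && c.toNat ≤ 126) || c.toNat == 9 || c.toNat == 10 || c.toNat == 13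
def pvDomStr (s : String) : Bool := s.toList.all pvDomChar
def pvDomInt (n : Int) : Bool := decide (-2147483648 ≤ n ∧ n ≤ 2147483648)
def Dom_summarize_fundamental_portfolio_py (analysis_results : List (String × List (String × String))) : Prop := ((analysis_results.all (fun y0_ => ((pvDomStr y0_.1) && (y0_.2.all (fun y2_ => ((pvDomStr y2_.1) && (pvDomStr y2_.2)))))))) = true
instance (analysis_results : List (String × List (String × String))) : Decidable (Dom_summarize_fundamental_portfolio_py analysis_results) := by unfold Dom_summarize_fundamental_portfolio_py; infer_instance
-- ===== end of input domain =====

-- B replaces A's single incremental two-dict counting pass by, per field, projecting the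
-- value list, deduplicating it to the first-occurrence key set, and counting each key with
-- a separate list.count scan (alternative algorithm; same result).


-- ===== PORT A =====
-- one loop over items, updating both count dicts; then the two-key result dict
def summarize_fundamental_portfolio_py (analysis_results : List (String × List (String × String))) : List (String × List (String × Int)) :=
  let st := analysis_results.foldl
    (fun st p =>
      let data : PySem.Dict String String := PySem.Dict.mk p.2
      let category := data.getD "category" "Unknown"
      let recommendation := data.getD "recommendation" "Hold"
      (st.1.insert category (st.1.getD category 0 + 1),
       st.2.insert recommendation (st.2.getD recommendation 0 + 1)))
    (PySem.Dict.empty, PySem.Dict.empty)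
  [("category_distribution", st.1.items), ("recommendation_distribution", st.2.items)]

-- ===== PORT B =====
-- _tally: 'if v not in seen: seen.append(v)' is PySem.Set.add; then a dict comprehension
-- over the (distinct) seen keys with values.count(v) — keys distinct, so the dict is the map
def pvTally (vals : List String) : List (String × Int) :=
  let seen : PySem.Set String := vals.foldl PySem.Set.add PySem.Set.empty
  seen.map (fun v => (v, (PySem.List.count vals v : Int)))

def summarize_fundamental_portfolio_py_alt (analysis_results : List (String × List (String × String))) : List (String × List (String × Int)) :=
  let categories := analysis_results.map (fun p => (PySem.Dict.mk p.2).getD "category" "Unknown")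
  let recommendations := analysis_results.map (fun p => (PySem.Dict.mk p.2).getD "recommendation" "Hold")
  [("category_distribution", pvTally categories),
   ("recommendation_distribution", pvTally recommendations)]

-- ===== PRECONDITION & SPEC =====
def Spec_summarize_fundamental_portfolio_py (analysis_results : List (String × List (String × String))) (out : List (String × List (String × Int))) : Prop := out = summarize_fundamental_portfolio_py_alt analysis_results
instance (analysis_results : List (String × List (String × String))) (out : List (String × List (String × Int))) : Decidable (Spec_summarize_fundamental_portfolio_py analysis_results out) := by unfold Spec_summarize_fundamental_portfolio_py; infer_instance

-- ===== CLAIM =====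
def Claim_equal_summarize_fundamental_portfolio_py : Prop := ∀ (analysis_results : List (String × List (String × String))), Dom_summarize_fundamental_portfolio_py analysis_results → Spec_summarize_fundamental_portfolio_py analysis_results (summarize_fundamental_portfolio_py analysis_results)

-- ===== LEMMAS AND PROOFS =====
-- A's per-field counting loop, keyed by a projection, yields exactly B's tally of the projected list
theorem items_foldl_eq_pvTally (l : List (String × List (String × String))) (k : String × List (String × String) → String) :
    (l.foldl (fun (d : PySem.Dict String Int) p => d.insert (k p) (d.getD (k p) 0 + 1)) PySem.Dict.empty).items
      = pvTally (l.map k) := by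
  rw [← List.foldl_map (f := k) (g := fun (d : PySem.Dict String Int) x => d.insert x (d.getD x 0 + 1))]
  rw [PySem.Dict.foldl_insert_getD_add_one_eq_counter]
  rw [PySem.Dict.items_counter]
  simp [pvTally, PySem.Set.ofList_eq_foldl, PySem.Set.empty, PySem.List.count_eq]

-- ===== VERDICT =====
theorem summarize_fundamental_portfolio_py_spec : Claim_equal_summarize_fundamental_portfolio_py := by
  intro analysis_results _
  show summarize_fundamental_portfolio_py analysis_results = summarize_fundamental_portfolio_py_alt analysis_results
  unfold summarize_fundamental_portfolio_py summarize_fundamental_portfolio_py_alt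
  rw [PySem.List.foldl_prod_mk
        (f := fun (d : PySem.Dict String Int) (p : String × List (String × String)) =>
          d.insert ((PySem.Dict.mk p.2).getD "category" "Unknown")
            (d.getD ((PySem.Dict.mk p.2).getD "category" "Unknown") 0 + 1))
        (g := fun (d : PySem.Dict String Int) (p : String × List (String × String)) =>
          d.insert ((PySem.Dict.mk p.2).getD "recommendation" "Hold")
            (d.getD ((PySem.Dict.mk p.2).getD "recommendation" "Hold") 0 + 1))]
  simp only [items_foldl_eq_pvTally]
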